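-- pv_equiv track=rewrite | github.com/areese801/delimited-diff | comparison_algorithm.py | _find_record_by_composite_key
-- ===== SOURCE A (Python) =====
-- def _find_record_by_composite_key(list_of_dicts:list, composite_key:str) -> dict:
--     """
--     Searches a list of dicts for a record with a specific composite key
--     :param list_of_dicts: List of dictionaries to search
--     :param composite_key: The sought composite key
--     :return:
--     """
--     ret_val = None
--
--     for _dict in list_of_dicts:
--         if _dict['__composite_key_hash'] == composite_key:
--             ret_val = _dict
--
--     if ret_val is None:
--         raise ValueError(f"Failed to locate record with composite key [{composite_key}]")
--
--     return ret_val
-- ===== SOURCE B (Python) =====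
-- def _find_record_by_composite_key(list_of_dicts: list, composite_key: str) -> dict:
--     """
--     Searches a list of dicts for a record with a specific composite key.
--     Scans backward and returns the first match found, which is the last
--     match in forward order (same last-match-wins semantics as the original,
--     but with an early exit instead of scanning the whole list).
--     """
--     for _dict in reversed(list_of_dicts):
--         if _dict['__composite_key_hash'] == composite_key:
--             return _dict
--
--     raise ValueError(f"Failed to locate record with composite key [{composite_key}]")
-- ===== Notes on version B (the rewrite author's own statement) =====
-- stated objective: alternative
-- what changed: B scans the list backward and returns immediately at the first match (last match in forward order), instead of A's full forward pass that overwrites an accumulator and returns it at the end.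
import Mathlib
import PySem

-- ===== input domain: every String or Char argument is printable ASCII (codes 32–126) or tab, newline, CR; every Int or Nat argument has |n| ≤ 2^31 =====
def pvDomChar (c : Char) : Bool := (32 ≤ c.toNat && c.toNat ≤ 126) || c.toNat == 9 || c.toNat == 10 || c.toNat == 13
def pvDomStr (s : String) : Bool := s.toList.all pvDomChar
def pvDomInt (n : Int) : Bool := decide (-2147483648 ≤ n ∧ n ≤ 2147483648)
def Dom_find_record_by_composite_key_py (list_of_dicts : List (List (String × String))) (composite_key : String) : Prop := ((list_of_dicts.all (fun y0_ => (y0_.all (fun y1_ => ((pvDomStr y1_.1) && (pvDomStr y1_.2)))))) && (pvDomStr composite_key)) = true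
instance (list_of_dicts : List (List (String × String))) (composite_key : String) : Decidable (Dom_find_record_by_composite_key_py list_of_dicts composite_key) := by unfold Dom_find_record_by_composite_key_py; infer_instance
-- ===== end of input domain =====

-- B scans backward with an early exit at the first (i.e. forward-last) match, instead of A's
-- full forward pass overwriting an accumulator ("alternative"; return value proved equal on Pre_).

-- ===== PORT A =====
-- _dict['__composite_key_hash'] : first-match lookup in the association list; none = KeyError
-- (excluded by Pre_; on such inputs the port treats the failed lookup as a non-match).
def pvHashOf (d : List (String × String)) : Option String :=
  d.lookup "__composite_key_hash"

-- the forward loop: ret_val starts None, is overwritten on every match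
def pvALoop (l : List (List (String × String))) (ck : String)
    (acc : Option (List (String × String))) : Option (List (String × String)) :=
  l.foldl (fun acc d => if pvHashOf d = some ck then some d else acc) acc

def find_record_by_composite_key_py (list_of_dicts : List (List (String × String))) (composite_key : String) : List (String × String) :=
  -- 'if ret_val is None: raise ValueError' : the none case is excluded by Pre_; return [] there
  match pvALoop list_of_dicts composite_key none with
  | some d => d
  | none => []

-- ===== PORT B =====
-- 'for _dict in reversed(list_of_dicts): if … : return _dict' ; falling off the loop raises
-- ValueError (excluded by Pre_; the port returns [] there).
def pvBGo (ck : String) : List (List (String × String)) → List (String × String)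
  | [] => []
  | d :: rest => if pvHashOf d = some ck then d else pvBGo ck rest

def find_record_by_composite_key_py_alt (list_of_dicts : List (List (String × String))) (composite_key : String) : List (String × String) :=
  pvBGo composite_key list_of_dicts.reverse

-- ===== PRECONDITION & SPEC =====
-- Pre_ excludes exactly the inputs on which the Python A raises: a record without the
-- '__composite_key_hash' key (KeyError) or no record matching the key (ValueError).
def Pre_find_record_by_composite_key_py (list_of_dicts : List (List (String × String))) (composite_key : String) : Prop :=
  (∀ d ∈ list_of_dicts, (pvHashOf d).isSome) ∧
  (∃ d ∈ list_of_dicts, pvHashOf d = some composite_key)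
instance (list_of_dicts : List (List (String × String))) (composite_key : String) : Decidable (Pre_find_record_by_composite_key_py list_of_dicts composite_key) := by unfold Pre_find_record_by_composite_key_py; infer_instance

def pvWitness_find_record_by_composite_key_py : (List (List (String × String))) × String :=
  ([[("__composite_key_hash", "k"), ("a", "1")]], "k")

def Spec_find_record_by_composite_key_py (list_of_dicts : List (List (String × String))) (composite_key : String) (out : List (String × String)) : Prop := out = find_record_by_composite_key_py_alt list_of_dicts composite_key
instance (list_of_dicts : List (List (String × String))) (composite_key : String) (out : List (String × String)) : Decidable (Spec_find_record_by_composite_key_py list_of_dicts composite_key out) := by unfold Spec_find_record_by_composite_key_py; infer_instance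

-- ===== CLAIM (what is proved, stated in full; the proofs are below) =====
def Claim_equal_find_record_by_composite_key_py : Prop := ∀ (list_of_dicts : List (List (String × String))) (composite_key : String), Dom_find_record_by_composite_key_py list_of_dicts composite_key → Pre_find_record_by_composite_key_py list_of_dicts composite_key → Spec_find_record_by_composite_key_py list_of_dicts composite_key (find_record_by_composite_key_py list_of_dicts composite_key)

-- ===== LEMMAS AND PROOFS =====

-- B's backward scan as an Option: first match of a list
def pvFirst (ck : String) : List (List (String × String)) → Option (List (String × String))
  | [] => none
  | d :: rest => if pvHashOf d = some ck then some d else pvFirst ck rest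

theorem pvBGo_eq_first (ck : String) (l : List (List (String × String))) :
    pvBGo ck l = (pvFirst ck l).getD [] := by
  induction l with
  | nil => rfl
  | cons d rest ih => simp only [pvBGo, pvFirst]; split <;> simp [ih]

theorem pvFirst_append (ck : String) (l m : List (List (String × String))) :
    pvFirst ck (l ++ m) = (pvFirst ck l).or (pvFirst ck m) := by
  induction l with
  | nil => rfl
  | cons d rest ih => simp only [List.cons_append, pvFirst]; split <;> simp [ih]

-- A's forward last-match fold equals the first match of the reversed list (or the start value)
theorem pvALoop_eq_first_reverse (ck : String) (l : List (List (String × String)))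
    (acc : Option (List (String × String))) :
    pvALoop l ck acc = (pvFirst ck l.reverse).or acc := by
  induction l generalizing acc with
  | nil => rfl
  | cons d rest ih =>
    simp only [pvALoop, List.foldl_cons, List.reverse_cons] at *
    rw [ih, pvFirst_append]
    cases h : pvFirst ck rest.reverse <;> simp [pvFirst] <;> split <;> simp

-- ===== VERDICT (by name: the statement is the Claim_ definition above) =====
theorem find_record_by_composite_key_py_spec : Claim_equal_find_record_by_composite_key_py := by
  intro l ck _ _
  unfold Spec_find_record_by_composite_key_py find_record_by_composite_key_py find_record_by_composite_key_py_alt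
  rw [pvALoop_eq_first_reverse, pvBGo_eq_first]
  cases pvFirst ck l.reverse <;> simp
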